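-- pv_equiv track=rewrite | github.com/pjmidgard/Spring-178 | Spring-178.py | binary_to_triples
-- ===== SOURCE A (Python) =====
-- def binary_to_triples(binary_data):
--     triples = []
--     current_triple = []
--
--     for value in binary_data:
--         current_triple.append(value)
--         if len(current_triple) == 3:
--             triples.append(tuple(current_triple))
--             current_triple = []
--
--     return triples
-- ===== SOURCE B (Python) =====
-- def binary_to_triples(binary_data):
--     data = list(binary_data)
--     if len(data) < 3:
--         return []
--     return [tuple(data[:3])] + binary_to_triples(data[3:])
-- ===== Notes on version B (the rewrite author's own statement) =====
-- stated objective: alternative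
-- what changed: Replaces A's iterative accumulate-and-reset buffer loop with a recursive decomposition on slices: peel the first three elements off as one triple and recurse on the rest, stopping when fewer than three elements remain.
import Mathlib
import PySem

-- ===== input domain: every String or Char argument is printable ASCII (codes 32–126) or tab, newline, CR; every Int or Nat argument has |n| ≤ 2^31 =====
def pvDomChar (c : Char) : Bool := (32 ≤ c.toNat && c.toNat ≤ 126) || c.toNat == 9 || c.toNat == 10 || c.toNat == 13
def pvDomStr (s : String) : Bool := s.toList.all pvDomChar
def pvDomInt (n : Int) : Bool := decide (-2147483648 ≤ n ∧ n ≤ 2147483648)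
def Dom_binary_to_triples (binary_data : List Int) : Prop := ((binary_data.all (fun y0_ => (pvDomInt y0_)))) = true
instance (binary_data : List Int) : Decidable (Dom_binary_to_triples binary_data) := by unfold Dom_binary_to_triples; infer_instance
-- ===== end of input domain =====

-- B replaces A's iterative accumulate-and-reset loop with recursion on slices (peel data[:3], recurse on data[3:]); same output, alternative decomposition.


-- ===== PORT A =====
-- A's for-loop over binary_data with state (triples, current_triple), transcribed as
-- structural recursion over the same state.
def btLoopA (bd : List Int) (triples : List (List Int)) (cur : List Int) : List (List Int) :=
  match bd with
  | [] => triples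
  | v :: rest =>
    let cur' := cur ++ [v]
    if cur'.length = 3 then btLoopA rest (triples ++ [cur']) []
    else btLoopA rest triples cur'

def binary_to_triples (binary_data : List Int) : List (List Int) :=
  btLoopA binary_data [] []

-- ===== PORT B =====
-- B recurses on slices: data[:3] is the head triple, recurse on data[3:]; [] below length 3.
def binary_to_triples_alt (binary_data : List Int) : List (List Int) :=
  if binary_data.length < 3 then []
  else PySem.List.slice binary_data none (some 3)
       :: binary_to_triples_alt (PySem.List.slice binary_data (some 3) none)
termination_by binary_data.length
decreasing_by rw [PySem.List.slice_some_none]; simp [PySem.List.clampIdx]; omega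

-- ===== PRECONDITION & SPEC =====
def Spec_binary_to_triples (binary_data : List Int) (out : List (List Int)) : Prop := out = binary_to_triples_alt binary_data
instance (binary_data : List Int) (out : List (List Int)) : Decidable (Spec_binary_to_triples binary_data out) := by unfold Spec_binary_to_triples; infer_instance

-- ===== CLAIM (what is proved, stated in full; the proofs are below) =====
def Claim_equal_binary_to_triples : Prop := ∀ (binary_data : List Int), Dom_binary_to_triples binary_data → Spec_binary_to_triples binary_data (binary_to_triples binary_data)

-- ===== LEMMAS AND PROOFS =====
theorem btB_cons : ∀ (a b c : Int) (rest : List Int),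
    binary_to_triples_alt (a :: b :: c :: rest) = [a, b, c] :: binary_to_triples_alt rest := by
  intro a b c rest
  rw [binary_to_triples_alt]
  simp [PySem.List.slice, PySem.List.clampIdx]

theorem btLoopA_eq : ∀ (bd : List Int) (acc : List (List Int)),
    btLoopA bd acc [] = acc ++ binary_to_triples_alt bd
  | [], acc => by rw [binary_to_triples_alt]; simp [btLoopA]
  | [a], acc => by rw [binary_to_triples_alt]; simp [btLoopA]
  | [a, b], acc => by rw [binary_to_triples_alt]; simp [btLoopA]
  | a :: b :: c :: rest, acc => by
      rw [btB_cons]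
      simp only [btLoopA, List.nil_append, List.length_cons, List.length_nil, List.cons_append]
      norm_num
      rw [btLoopA_eq rest (acc ++ [[a, b, c]])]
      simp

-- ===== VERDICT (by name: the statement is the Claim_ definition above) =====
theorem binary_to_triples_spec : Claim_equal_binary_to_triples := by
  intro bd _
  unfold Spec_binary_to_triples binary_to_triples
  simpa using btLoopA_eq bd []
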